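-- pv_equiv track=rewrite | github.com/malon/presupuesto | theme-caba/scripts/utils.py | get_titles
-- ===== SOURCE A (Python) =====
-- classifications = [
--     # JURISDICCION
--     [{
--         'entity_name': 'jurisdiccion',
--         'id_title': 'jurisdiccion',
--         'name_title': 'desc_juris',
--         'length': '2'
--     # }, {
--     #     'entity_name': 'subjurisdiccion',
--     #     'id_title': 'subjurisdiccion',
--     #     'name_title': 'desc_sjuris'
--     # }, {
--     #     'entity_name': 'entidad',
--     #     'id_title': 'entidad',
--     #     'name_title': 'desc_entidad'
--     }, {
--         'entity_name': 'servicio',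
--         'id_title': 'ogese',
--         'name_title': 'descn_servicio',
--         'length': '3'
--     }, {
--         'entity_name': 'unidad_ejecutora',
--         'id_title': 'unidad_ejecutora',
--         'name_title': 'desc_ue',
--         'length': '4'
--     }],
--     # PROGRAMA
--     [{
--         'entity_name': 'programa',
--         'id_title': 'programa',
--         'name_title': 'desc_programa',
--         'length': '3'
--     }, {
--         'entity_name': 'subprograma',
--         'id_title': 'subprograma',
--         'name_title': 'desc_subprograma',
--         'length': '2'
--     }, {
--         'entity_name': 'proyecto',
--         'id_title': 'proyecto',
--         'name_title': 'desc_proyecto',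
--         'length': '2'
--     }],
--     # INCISO
--     # [{
--     #     'entity_name': 'inciso',
--     #     'id_title': 'inciso',
--     #     'name_title': 'desc_inciso',
--     #     'length': '1'
--     # }, {
--     #     'entity_name': 'principal',
--     #     'id_title': 'principal',
--     #     'name_title': 'desc_principal',
--     #     'length': '1'
--     # }, {
--     #     'entity_name': 'parcial',
--     #     'id_title': 'parcial',
--     #     'name_title': 'desc_parcial',
--     #     'length': '1'
--     # }],
--     # UBICACION GEOGRÁFICA
--     [{
--         'entity_name': 'ubicacion_geografica',
--         'id_title': 'ubicacion_geografica',
--         'name_title': 'desc_ubica_geo',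
--         'length': '2'
--     }],
--     # FINALIDAD
--     [{
--         'entity_name': 'finalidad',
--         'id_title': 'finalidad',
--         'name_title': 'desc_finalidad',
--         'length': '1'
--     }, {
--         'entity_name': 'funcion',
--         'id_title': 'funcion',
--         'name_title': 'desc_fin_fun',
--         'length': '1'
--     }],
--     # FINANCIACION
--     [{
--         'entity_name': 'fuente_fin',
--         'id_title': 'fuente_fin',
--         'name_title': 'desc_fuente_fin',
--         'length': '2'
--     }]
-- ]
--
-- def get_titles(key):
--     mylist = ['ejercicio']
--     for clas in classifications:
--         if clas[0]['entity_name'] == key: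
--             for entity in clas:
--                 mylist.append(entity['entity_name'])
--             break
--     mylist.append('descripcion')
--     return mylist
-- ===== SOURCE B (Python) =====
-- # B: a flat precomputed table keyed by each group's leading entity_name, holding
-- # the complete title row; get_titles is a single lookup, no scan over the nested
-- # classification records.
-- _TITLE_ROWS = {
--     'jurisdiccion': ['ejercicio', 'jurisdiccion', 'servicio', 'unidad_ejecutora', 'descripcion'],
--     'programa': ['ejercicio', 'programa', 'subprograma', 'proyecto', 'descripcion'],
--     'ubicacion_geografica': ['ejercicio', 'ubicacion_geografica', 'descripcion'],
--     'finalidad': ['ejercicio', 'finalidad', 'funcion', 'descripcion'],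
--     'fuente_fin': ['ejercicio', 'fuente_fin', 'descripcion'],
-- }
--
-- def get_titles(key):
--     return list(_TITLE_ROWS.get(key, ['ejercicio', 'descripcion']))
-- ===== Notes on version B (the rewrite author's own statement) =====
-- stated objective: simpler
-- what changed: Replaces A's scan over the nested classification records (with an inner append-loop and break) by a flat precomputed table mapping each leading entity_name directly to the complete title row, so get_titles is one dict lookup with a default.
import Mathlib
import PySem

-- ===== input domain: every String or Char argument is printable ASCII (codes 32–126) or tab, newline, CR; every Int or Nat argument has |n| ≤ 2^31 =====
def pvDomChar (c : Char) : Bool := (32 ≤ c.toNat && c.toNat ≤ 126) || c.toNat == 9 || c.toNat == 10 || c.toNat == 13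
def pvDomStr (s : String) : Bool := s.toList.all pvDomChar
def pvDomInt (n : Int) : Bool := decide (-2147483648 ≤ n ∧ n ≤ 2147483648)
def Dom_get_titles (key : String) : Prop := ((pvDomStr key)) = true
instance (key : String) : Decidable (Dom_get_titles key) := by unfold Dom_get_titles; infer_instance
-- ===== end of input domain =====

-- B replaces A's scan over nested classification records by a flat precomputed table
-- (leading entity_name → complete title row) and a single lookup; objective: simpler.

-- ===== PORT A =====
-- module constant `classifications` (the commented-out groups of the source are omitted, as in Python)
def classifications : List (List (PySem.Dict String String)) :=
  [ [ PySem.Dict.mk [("entity_name", "jurisdiccion"), ("id_title", "jurisdiccion"), ("name_title", "desc_juris"), ("length", "2")],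
      PySem.Dict.mk [("entity_name", "servicio"), ("id_title", "ogese"), ("name_title", "descn_servicio"), ("length", "3")],
      PySem.Dict.mk [("entity_name", "unidad_ejecutora"), ("id_title", "unidad_ejecutora"), ("name_title", "desc_ue"), ("length", "4")] ],
    [ PySem.Dict.mk [("entity_name", "programa"), ("id_title", "programa"), ("name_title", "desc_programa"), ("length", "3")],
      PySem.Dict.mk [("entity_name", "subprograma"), ("id_title", "subprograma"), ("name_title", "desc_subprograma"), ("length", "2")],
      PySem.Dict.mk [("entity_name", "proyecto"), ("id_title", "proyecto"), ("name_title", "desc_proyecto"), ("length", "2")] ],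
    [ PySem.Dict.mk [("entity_name", "ubicacion_geografica"), ("id_title", "ubicacion_geografica"), ("name_title", "desc_ubica_geo"), ("length", "2")] ],
    [ PySem.Dict.mk [("entity_name", "finalidad"), ("id_title", "finalidad"), ("name_title", "desc_finalidad"), ("length", "1")],
      PySem.Dict.mk [("entity_name", "funcion"), ("id_title", "funcion"), ("name_title", "desc_fin_fun"), ("length", "1")] ],
    [ PySem.Dict.mk [("entity_name", "fuente_fin"), ("id_title", "fuente_fin"), ("name_title", "desc_fuente_fin"), ("length", "2")] ] ]

-- A's for-loop with break: scan the groups; on the first group whose clas[0]['entity_name'] == key,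
-- append every entity's entity_name and stop.  (clas[0] / d['entity_name'] always succeed on the constant data.)
def aScan (key : String) (cs : List (List (PySem.Dict String String))) (mylist : List String) : List String :=
  match cs with
  | [] => mylist
  | clas :: rest =>
    if (((PySem.List.pyGet? clas 0).getD PySem.Dict.empty).getD "entity_name" "") == key then
      mylist ++ clas.map (fun entity => entity.getD "entity_name" "")   -- inner append loop, then break
    else
      aScan key rest mylist

def get_titles (key : String) : List String :=
  aScan key classifications ["ejercicio"] ++ ["descripcion"]

-- ===== PORT B =====
-- flat precomputed table: leading entity_name → complete title row
def titleRows : PySem.Dict String (List String) :=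
  PySem.Dict.mk
    [ ("jurisdiccion", ["ejercicio", "jurisdiccion", "servicio", "unidad_ejecutora", "descripcion"]),
      ("programa", ["ejercicio", "programa", "subprograma", "proyecto", "descripcion"]),
      ("ubicacion_geografica", ["ejercicio", "ubicacion_geografica", "descripcion"]),
      ("finalidad", ["ejercicio", "finalidad", "funcion", "descripcion"]),
      ("fuente_fin", ["ejercicio", "fuente_fin", "descripcion"]) ]

def get_titles_alt (key : String) : List String :=
  titleRows.getD key ["ejercicio", "descripcion"]

-- ===== PRECONDITION & SPEC =====
def Spec_get_titles (key : String) (out : List String) : Prop := out = get_titles_alt key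
instance (key : String) (out : List String) : Decidable (Spec_get_titles key out) := by unfold Spec_get_titles; infer_instance

-- ===== CLAIM =====
def Claim_equal_get_titles : Prop := ∀ (key : String), Dom_get_titles key → Spec_get_titles key (get_titles key)

-- ===== LEMMAS AND PROOFS =====

-- ===== VERDICT =====
theorem get_titles_spec : Claim_equal_get_titles := by
  intro key _
  unfold Spec_get_titles get_titles get_titles_alt
  by_cases h1 : "jurisdiccion" = key
  · subst h1; decide
  by_cases h2 : "programa" = key
  · subst h2; decide
  by_cases h3 : "ubicacion_geografica" = key
  · subst h3; decide
  by_cases h4 : "finalidad" = key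
  · subst h4; decide
  by_cases h5 : "fuente_fin" = key
  · subst h5; decide
  simp [aScan, titleRows, classifications, PySem.Dict.getD,
    PySem.List.pyGet?, PySem.List.pyIdx?, PySem.Dict.get?, h1, h2, h3, h4, h5]
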